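-- pv_equiv track=rewrite | github.com/j-mattias/budget | helpers.py | escape_chars
-- ===== SOURCE A (Python) =====
-- def escape_chars(text):
--
--     # https://memegen.link/#special-characters
--     # Escape characters that collide with reserved URL characters
--     for normal, escaped in [
--         ("?", "~q" ),
--         ("&", "~a"),
--         ("%", "~p"),
--         ("#", "~h"),
--         ("/", "~s"),
--         ("\\", "~b"),
--         ("<", "~l"),
--         (">", "~g"),
--         ('"', "''"),
--         ("-", "--"),
--         ("_", "__"),
--         (" ", "-"),
--         ("\n", "~n")
--     ]:
--         text = text.replace(normal, escaped)
--
--     return text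
-- ===== SOURCE B (Python) =====
-- # B: one-pass character translation via a table built once with str.maketrans,
-- # instead of A's 13 sequential full-string .replace() passes.
-- _TABLE = str.maketrans({
--     "?": "~q",
--     "&": "~a",
--     "%": "~p",
--     "#": "~h",
--     "/": "~s",
--     "\\": "~b",
--     "<": "~l",
--     ">": "~g",
--     '"': "''",
--     "-": "--",
--     "_": "__",
--     " ": "-",
--     "\n": "~n",
-- })
--
--
-- def escape_chars(text):
--     return text.translate(_TABLE)
-- ===== Notes on version B (the rewrite author's own statement) =====
-- stated objective: idiomatic
-- what changed: Replaces A's 13 sequential full-string str.replace passes with a single translation table built once via str.maketrans and one text.translate pass over the characters.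
import Mathlib
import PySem

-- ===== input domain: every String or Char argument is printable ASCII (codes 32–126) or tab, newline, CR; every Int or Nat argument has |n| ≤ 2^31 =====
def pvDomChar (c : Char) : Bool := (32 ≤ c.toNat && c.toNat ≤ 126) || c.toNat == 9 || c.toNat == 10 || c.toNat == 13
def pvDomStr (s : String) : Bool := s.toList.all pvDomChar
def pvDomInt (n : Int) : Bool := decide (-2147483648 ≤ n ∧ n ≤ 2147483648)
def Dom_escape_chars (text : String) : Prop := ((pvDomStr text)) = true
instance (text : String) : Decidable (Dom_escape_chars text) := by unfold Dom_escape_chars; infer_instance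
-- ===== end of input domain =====

-- B builds one char→string escape table and translates the text in a single pass,
-- instead of A's 13 sequential full-string replace passes (idiomatic; same result).


-- ===== PORT A =====
-- A loops over the 13 (normal, escaped) pairs, doing text = text.replace(normal, escaped).
def escPairsA : List (String × String) :=
  [("?", "~q"), ("&", "~a"), ("%", "~p"), ("#", "~h"), ("/", "~s"), ("\\", "~b"),
   ("<", "~l"), (">", "~g"), ("\"", "''"), ("-", "--"), ("_", "__"), (" ", "-"), ("\n", "~n")]

def escape_chars (text : String) : String :=
  escPairsA.foldl (fun t p => PySem.Str.replace t p.1 p.2) text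

-- ===== PORT B =====
-- B's translation table (str.maketrans dict): each reserved char maps to its escape
-- string, every other char maps to itself; translate applies it to each char once.
def escTable (c : Char) : List Char :=
  if c = '?' then ['~', 'q']
  else if c = '&' then ['~', 'a']
  else if c = '%' then ['~', 'p']
  else if c = '#' then ['~', 'h']
  else if c = '/' then ['~', 's']
  else if c = '\\' then ['~', 'b']
  else if c = '<' then ['~', 'l']
  else if c = '>' then ['~', 'g']
  else if c = '"' then ['\'', '\'']
  else if c = '-' then ['-', '-']
  else if c = '_' then ['_', '_']
  else if c = ' ' then ['-']
  else if c = '\n' then ['~', 'n']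
  else [c]

def escape_chars_alt (text : String) : String :=
  String.ofList (text.toList.flatMap escTable)

-- ===== PRECONDITION & SPEC =====
def Spec_escape_chars (text : String) (out : String) : Prop := out = escape_chars_alt text
instance (text : String) (out : String) : Decidable (Spec_escape_chars text out) := by unfold Spec_escape_chars; infer_instance

-- ===== CLAIM (what is proved, stated in full; the proofs are below) =====
def Claim_equal_escape_chars : Prop := ∀ (text : String), Dom_escape_chars text → Spec_escape_chars text (escape_chars text)

-- ===== LEMMAS AND PROOFS =====

-- str.replace with a single-char needle is a per-char expansion.
theorem go_single (k : Char) (rep : List Char) :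
    ∀ (s acc : List Char) (fuel : Nat), s.length ≤ fuel →
      PySem.Chars.replace.go [k] rep fuel s acc
        = acc.reverse ++ s.flatMap (fun x => if x = k then rep else [x]) := by
  intro s
  induction s with
  | nil => intro acc fuel _; cases fuel <;> simp [PySem.Chars.replace.go]
  | cons c t ih =>
    intro acc fuel hf
    cases fuel with
    | zero => simp at hf
    | succ f =>
      simp only [PySem.Chars.replace.go]
      by_cases h : c = k
      · subst h
        simp [List.isPrefixOf, ih _ f (by simpa using hf)]
      · simp [List.isPrefixOf, Ne.symm h, h, ih _ f (by simpa using hf)]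

theorem replace_single (s : List Char) (k : Char) (rep : List Char) :
    PySem.Chars.replace s [k] rep = s.flatMap (fun x => if x = k then rep else [x]) := by
  simp [PySem.Chars.replace, go_single k rep s [] s.length le_rfl]

-- The whole chain of 13 per-char expansions equals one pass through B's table.
set_option maxHeartbeats 1000000 in
set_option maxRecDepth 4096 in
theorem chain_list (s : List Char) :
    PySem.Chars.replace (PySem.Chars.replace (PySem.Chars.replace (PySem.Chars.replace
      (PySem.Chars.replace (PySem.Chars.replace (PySem.Chars.replace (PySem.Chars.replace
      (PySem.Chars.replace (PySem.Chars.replace (PySem.Chars.replace (PySem.Chars.replace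
      (PySem.Chars.replace s ['?'] ['~','q']) ['&'] ['~','a']) ['%'] ['~','p'])
      ['#'] ['~','h']) ['/'] ['~','s']) ['\\'] ['~','b']) ['<'] ['~','l'])
      ['>'] ['~','g']) ['"'] ['\'','\'']) ['-'] ['-','-']) ['_'] ['_','_'])
      [' '] ['-']) ['\n'] ['~','n'] = s.flatMap escTable := by
  simp only [replace_single]
  simp only [List.flatMap_assoc]
  apply List.flatMap_congr
  intro c _
  by_cases h1 : c = '?'; · subst h1; decide
  by_cases h2 : c = '&'; · subst h2; decide
  by_cases h3 : c = '%'; · subst h3; decide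
  by_cases h4 : c = '#'; · subst h4; decide
  by_cases h5 : c = '/'; · subst h5; decide
  by_cases h6 : c = '\\'; · subst h6; decide
  by_cases h7 : c = '<'; · subst h7; decide
  by_cases h8 : c = '>'; · subst h8; decide
  by_cases h9 : c = '"'; · subst h9; decide
  by_cases h10 : c = '-'; · subst h10; decide
  by_cases h11 : c = '_'; · subst h11; decide
  by_cases h12 : c = ' '; · subst h12; decide
  by_cases h13 : c = '\n'; · subst h13; decide
  simp [escTable, h1, h2, h3, h4, h5, h6, h7, h8, h9, h10, h11, h12, h13]

-- ===== VERDICT (by name: the statement is the Claim_ definition above) =====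
theorem escape_chars_spec : Claim_equal_escape_chars := by
  intro text _
  show escape_chars text = escape_chars_alt text
  apply String.toList_inj.mp
  unfold escape_chars escape_chars_alt escPairsA
  simp only [List.foldl, PySem.Str.toList_replace, String.toList_ofList]
  simpa using chain_list text.toList
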